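-- pv_equiv track=rewrite | github.com/marko1616/mahjong-gpt | src/env/tiles.py | iter_chi_sequences_containing
-- ===== SOURCE A (Python) =====
-- from typing import Iterable, Tuple
--
-- def is_suit(tile34: int) -> bool:
--     """Return True if tile is a suited tile (m/p/s)."""
--     return 0 <= tile34 <= 26
--
-- def suit_base(tile34: int) -> int:
--     """Return suit base offset (0, 9, 18) for suited tiles."""
--     if not is_suit(tile34):
--         raise ValueError(f"not a suited tile: {tile34}")
--     return (tile34 // 9) * 9
--
-- def iter_chi_sequences_containing(tile34: int) -> Iterable[Tuple[int, int, int]]: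
--     """
--     Sliding-window iterator for chi sequences that contain the given tile.
--     Example: for a suited tile in a suit, possible sequences are:
--     (n-2,n-1,n), (n-1,n,n+1), (n,n+1,n+2) bounded within 1..9.
--     """
--     if not is_suit(tile34):
--         return
--
--     base = suit_base(tile34)
--     offset = tile34 - base  # 0..8
--
--     for start in (offset - 2, offset - 1, offset):
--         if 0 <= start <= 6:
--             yield (base + start, base + start + 1, base + start + 2)
-- ===== SOURCE B (Python) =====
-- from typing import Iterable, Tuple
--
-- def iter_chi_sequences_containing(tile34: int) -> Iterable[Tuple[int, int, int]]:
--     if not (0 <= tile34 <= 26):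
--         return
--     base = (tile34 // 9) * 9
--     for start in range(7):
--         seq = (base + start, base + start + 1, base + start + 2)
--         if tile34 in seq:
--             yield seq
-- ===== Notes on version B (the rewrite author's own statement) =====
-- stated objective: alternative
-- what changed: B enumerates all seven run starts in the suit and filters by membership of the tile, instead of computing the three candidate starts from the tile's offset and bound-checking them.
import Mathlib
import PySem

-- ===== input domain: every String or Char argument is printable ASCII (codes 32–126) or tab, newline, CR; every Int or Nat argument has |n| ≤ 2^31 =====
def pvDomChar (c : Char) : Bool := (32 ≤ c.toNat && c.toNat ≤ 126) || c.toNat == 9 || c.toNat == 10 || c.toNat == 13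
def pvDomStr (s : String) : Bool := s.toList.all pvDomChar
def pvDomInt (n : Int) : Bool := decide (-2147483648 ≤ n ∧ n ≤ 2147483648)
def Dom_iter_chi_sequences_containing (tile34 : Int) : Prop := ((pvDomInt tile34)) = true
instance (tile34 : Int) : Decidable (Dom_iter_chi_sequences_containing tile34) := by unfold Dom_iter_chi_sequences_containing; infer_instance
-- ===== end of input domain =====

-- B enumerates all seven run starts in the suit and filters by tile membership,
-- instead of computing candidate starts from the tile's offset (alternative decomposition).
-- ===== PORT A =====
def pv_is_suit (tile34 : Int) : Bool := decide (0 ≤ tile34 ∧ tile34 ≤ 26)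

def pv_suit_base (tile34 : Int) : Int := (PySem.Int.floordiv tile34 9) * 9

def iter_chi_sequences_containing (tile34 : Int) : List (Int × Int × Int) :=
  if ¬ pv_is_suit tile34 then []
  else
    let base := pv_suit_base tile34
    let offset := tile34 - base
    [offset - 2, offset - 1, offset].foldl (fun acc start =>
      if 0 ≤ start ∧ start ≤ 6 then
        acc ++ [(base + start, base + start + 1, base + start + 2)]
      else acc) []

-- ===== PORT B =====
def iter_chi_sequences_containing_alt (tile34 : Int) : List (Int × Int × Int) :=
  if ¬ decide (0 ≤ tile34 ∧ tile34 ≤ 26) then []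
  else
    let base := (PySem.Int.floordiv tile34 9) * 9
    (PySem.List.pyRange 0 7 1).foldl (fun acc start =>
      let seq := (base + start, base + start + 1, base + start + 2)
      if tile34 = seq.1 ∨ tile34 = seq.2.1 ∨ tile34 = seq.2.2 then acc ++ [seq]
      else acc) []

-- ===== PRECONDITION & SPEC =====
def Spec_iter_chi_sequences_containing (tile34 : Int) (out : List (Int × Int × Int)) : Prop := out = iter_chi_sequences_containing_alt tile34
instance (tile34 : Int) (out : List (Int × Int × Int)) : Decidable (Spec_iter_chi_sequences_containing tile34 out) := by unfold Spec_iter_chi_sequences_containing; infer_instance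

-- ===== CLAIM (what is proved, stated in full; the proofs are below) =====
def Claim_equal_iter_chi_sequences_containing : Prop := ∀ (tile34 : Int), Dom_iter_chi_sequences_containing tile34 → Spec_iter_chi_sequences_containing tile34 (iter_chi_sequences_containing tile34)

-- ===== LEMMAS AND PROOFS =====

-- ===== VERDICT (by name: the statement is the Claim_ definition above) =====
theorem iter_chi_sequences_containing_spec : Claim_equal_iter_chi_sequences_containing := by
  intro tile34 _hd
  unfold Spec_iter_chi_sequences_containing
  by_cases h : 0 ≤ tile34 ∧ tile34 ≤ 26
  · obtain ⟨h0, h1⟩ := h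
    interval_cases tile34 <;> decide
  · simp only [iter_chi_sequences_containing, iter_chi_sequences_containing_alt, pv_is_suit]
    rw [if_pos, if_pos]
    · simpa using h
    · simpa using h
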